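-- pv_equiv track=rewrite | github.com/trowland02/fantasy-football | backend/app/gameLib.py | _alphabetic_2darray
-- ===== SOURCE A (Python) =====
-- def _alphabetic_2darray(array, textIndex):
--
--     alphabetical_array = [[] for _ in range(27)]  # 26 alphabets + 1 for filenames starting with non-alphabets
--
--     # Group filenames based on their first letter
--     for instance in array:
--         first_letter = instance[textIndex][0].upper()
--         if first_letter.isalpha():
--             index = ord(first_letter) - ord('A')
--         else:
--             index = 26
--         alphabetical_array[index].append(instance)
--
--     sorted_array = []
--     # Sort the lists
--     for array_list in alphabetical_array:
--         sorted_array.append(sorted(array_list, key=lambda x: x[textIndex]))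
--
--     return sorted_array
-- ===== SOURCE B (Python) =====
-- def _alphabetic_2darray(array, textIndex):
--     # Per-letter comprehension: for each of the 27 bucket indices, filter the
--     # matching rows out of the input and sort them; no mutable bucket array.
--     def bucket(inst):
--         c = inst[textIndex][0].upper()
--         return ord(c) - ord('A') if c.isalpha() else 26
--     return [sorted([inst for inst in array if bucket(inst) == i],
--                    key=lambda x: x[textIndex])
--             for i in range(27)]
-- ===== Notes on version B (the rewrite author's own statement) =====
-- stated objective: alternative
-- what changed: A builds 27 mutable buckets in one distribution loop and then sorts each bucket; B has no bucket array at all: for each of the 27 indices it filters the matching rows out of the input by a comprehension and sorts that filtered list directly.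
import Mathlib
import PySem

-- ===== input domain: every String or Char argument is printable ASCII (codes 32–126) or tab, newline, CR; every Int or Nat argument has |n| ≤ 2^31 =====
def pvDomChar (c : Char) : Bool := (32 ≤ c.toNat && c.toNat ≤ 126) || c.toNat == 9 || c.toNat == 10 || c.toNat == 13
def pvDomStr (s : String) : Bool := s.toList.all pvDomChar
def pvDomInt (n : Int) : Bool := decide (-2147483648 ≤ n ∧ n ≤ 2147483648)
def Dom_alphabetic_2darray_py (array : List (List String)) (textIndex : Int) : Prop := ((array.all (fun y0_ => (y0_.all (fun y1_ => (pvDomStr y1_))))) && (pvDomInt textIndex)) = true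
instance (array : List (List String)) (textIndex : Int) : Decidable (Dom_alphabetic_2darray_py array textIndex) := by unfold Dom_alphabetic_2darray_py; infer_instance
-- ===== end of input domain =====

-- B replaces A's mutable 27-bucket distribution loop by a per-letter filter-and-sort
-- comprehension; same return value on every input where A returns (alternative decomposition).


-- ===== PORT A =====
-- instance[textIndex][0].upper(): bucket index of one row (the same computation appears
-- as the helper 'bucket' in B); the [] branch is Python's IndexError on an empty string,
-- excluded by Pre_.
def pvBucketIdx (textIndex : Int) (inst : List String) : Nat :=
  match (PySem.List.pyGetD inst textIndex "").toList with
  | [] => 26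
  | c :: _ =>
    match PySem.Chars.upper [c] with
    | [fl] => if PySem.Chars.isalpha fl then fl.toNat - 65 else 26
    | _ => 26

-- A's grouping loop: append each row to its bucket in a mutable 27-bucket array
def pvDistribute (textIndex : Int) (xs : List (List String)) : List (List (List String)) :=
  xs.foldl
    (fun acc inst =>
      acc.set (pvBucketIdx textIndex inst)
        (acc.getD (pvBucketIdx textIndex inst) [] ++ [inst]))
    (List.replicate 27 [])

-- A: group first, then sort each of the 27 buckets
def alphabetic_2darray_py (array : List (List String)) (textIndex : Int) : List (List (List String)) :=
  (pvDistribute textIndex array).map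
    (fun l => PySem.List.sorted l (fun x => PySem.List.pyGetD x textIndex ""))

-- ===== PORT B =====
-- B: for each bucket index i, filter the rows whose bucket is i and sort them
def alphabetic_2darray_py_alt (array : List (List String)) (textIndex : Int) : List (List (List String)) :=
  (List.range 27).map (fun i =>
    PySem.List.sorted (array.filter (fun inst => pvBucketIdx textIndex inst == i))
      (fun x => PySem.List.pyGetD x textIndex ""))

-- ===== PRECONDITION & SPEC =====
-- Pre_ excludes exactly the inputs where the Python A raises IndexError: a row for which
-- textIndex is out of range, or whose selected text field is the empty string.
def Pre_alphabetic_2darray_py (array : List (List String)) (textIndex : Int) : Prop :=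
  ∀ inst ∈ array, PySem.Raise.InRange inst.length textIndex ∧
    PySem.List.pyGetD inst textIndex "" ≠ ""
instance (array : List (List String)) (textIndex : Int) : Decidable (Pre_alphabetic_2darray_py array textIndex) := by unfold Pre_alphabetic_2darray_py; infer_instance

def pvWitness_alphabetic_2darray_py : List (List String) × Int :=
  ([["banana", "3"], ["Apple", "1"], ["7up", "2"], ["apricot", "9"]], 0)

def Spec_alphabetic_2darray_py (array : List (List String)) (textIndex : Int) (out : List (List (List String))) : Prop := out = alphabetic_2darray_py_alt array textIndex
instance (array : List (List String)) (textIndex : Int) (out : List (List (List String))) : Decidable (Spec_alphabetic_2darray_py array textIndex out) := by unfold Spec_alphabetic_2darray_py; infer_instance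

-- ===== CLAIM (what is proved, stated in full; the proofs are below) =====
def Claim_equal_alphabetic_2darray_py : Prop := ∀ (array : List (List String)) (textIndex : Int), Dom_alphabetic_2darray_py array textIndex → Pre_alphabetic_2darray_py array textIndex → Spec_alphabetic_2darray_py array textIndex (alphabetic_2darray_py array textIndex)

-- ===== LEMMAS AND PROOFS =====

-- A's grouping loop, characterised bucket by bucket as a filter
lemma distribute_eq (textIndex : Int) (xs : List (List String)) :
    pvDistribute textIndex xs =
      (List.range 27).map (fun i => xs.filter (fun inst => pvBucketIdx textIndex inst == i)) := by
  induction xs using List.reverseRecOn with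
  | nil =>
    simp [pvDistribute, List.map_const']
  | append_singleton xs x ih =>
    unfold pvDistribute at *
    rw [List.foldl_append, List.foldl_cons, List.foldl_nil, ih]
    apply List.ext_getElem
    · simp
    · intro k hk1 hk2
      simp only [List.length_set, List.length_map, List.length_range] at hk1
      rw [List.getElem_set]
      by_cases hkj : pvBucketIdx textIndex x = k
      · have hk27 : k < 27 := hk1
        simp [hkj, List.getD, hk27, List.filter_append]
      · simp [hkj, List.filter_append]

-- ===== VERDICT (by name: the statement is the Claim_ definition above) =====
theorem alphabetic_2darray_py_spec : Claim_equal_alphabetic_2darray_py := by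
  intro array textIndex _ _
  unfold Spec_alphabetic_2darray_py alphabetic_2darray_py alphabetic_2darray_py_alt
  rw [distribute_eq, List.map_map]
  rfl
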